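-- pv_equiv track=rewrite | github.com/KyubinHwang/preparing_Algorithm | algorithm_2022_summer_To_Fall/코테/nc소프트.py | solution
-- ===== SOURCE A (Python) =====
-- def solution(source):
--     answer = []
--     source = list(source)
--     while source:
--         tmp = []
--         delsource = []
--         for i in range(len(source)):
--             if source[i] not in tmp:
--                 delsource.append(source[i])
--                 tmp.append(source[i])
--         for i in delsource:
--             source.remove(i)
--         tmp.sort()
--
--         answer += tmp
--
--     result = ''.join(answer)
--
--     return result
-- ===== SOURCE B (Python) =====
-- def solution(source):
--     counts = {}
--     for c in source:
--         counts[c] = counts.get(c, 0) + 1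
--     chars = sorted(counts)
--     m = max(counts.values(), default=0)
--     out = []
--     for k in range(1, m + 1):
--         for c in chars:
--             if counts[c] >= k:
--                 out.append(c)
--     return ''.join(out)
-- ===== Notes on version B (the rewrite author's own statement) =====
-- stated objective: faster
-- what changed: Replaces A's repeated dedup-and-remove passes over the shrinking character list (each round scans, removes and sorts) by a single frequency count followed by one sort of the distinct characters and emitting, for k = 1..max count, the sorted characters whose count is at least k.
import Mathlib
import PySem

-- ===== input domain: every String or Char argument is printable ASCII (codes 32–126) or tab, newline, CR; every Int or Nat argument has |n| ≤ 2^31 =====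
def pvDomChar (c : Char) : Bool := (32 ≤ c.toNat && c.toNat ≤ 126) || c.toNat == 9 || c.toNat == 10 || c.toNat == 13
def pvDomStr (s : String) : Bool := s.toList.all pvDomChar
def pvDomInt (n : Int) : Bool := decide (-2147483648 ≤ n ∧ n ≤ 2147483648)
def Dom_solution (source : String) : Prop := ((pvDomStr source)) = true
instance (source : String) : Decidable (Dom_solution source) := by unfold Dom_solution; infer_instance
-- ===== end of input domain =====

-- B replaces A's repeated scan-remove-sort rounds over the shrinking list by one
-- frequency count plus one sort of the distinct characters (objective: faster).

-- ===== PORT A =====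
-- one round of A's while-body first loop: for i in range(len(source)), build (tmp, delsource)
def solutionPass (src : List Char) : List Char × List Char :=
  (PySem.List.pyRange 0 (PySem.List.len src) 1).foldl
    (fun (st : List Char × List Char) i =>
      if PySem.List.pyGetD src i ' ' ∈ st.1 then st
      else (st.1 ++ [PySem.List.pyGetD src i ' '], st.2 ++ [PySem.List.pyGetD src i ' ']))
    ([], [])

-- 'for i in delsource: source.remove(i)'; remove? never returns none here, because every
-- element of delsource occurs in source (delsource lists source's distinct elements)
def solutionRemove (src del : List Char) : List Char :=
  del.foldl (fun s i => (PySem.List.remove? s i).getD s) src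

-- The next four lemmas are cited by the while loop's decreasing_by, so they stay above it.
lemma pass_fold (l : List Char) : ∀ (t : List Char),
    l.foldl (fun (st : List Char × List Char) c =>
      if c ∈ st.1 then st else (st.1 ++ [c], st.2 ++ [c])) (t, t)
      = (l.foldl PySem.Set.add t, l.foldl PySem.Set.add t) := by
  induction l with
  | nil => intro t; rfl
  | cons a l ih =>
    intro t
    simp only [List.foldl_cons, PySem.Set.add_eq_ite]
    split_ifs <;> exact ih _

-- A's first inner loop collects the distinct characters: tmp = delsource = dedup src
lemma solutionPass_eq_dedup (src : List Char) :
    solutionPass src = (PySem.List.dedup src, PySem.List.dedup src) := by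
  unfold solutionPass
  rw [PySem.List.foldl_pyRange_zero_pyGetD src ' '
    (fun (st : List Char × List Char) c =>
      if c ∈ st.1 then st else (st.1 ++ [c], st.2 ++ [c])) ([], [])]
  rw [pass_fold src []]
  simp [PySem.List.dedup_eq_ofList, PySem.Set.ofList_eq_foldl]

lemma solutionRemove_length_le (del : List Char) : ∀ (src : List Char),
    (solutionRemove src del).length ≤ src.length := by
  induction del with
  | nil => intro src; exact le_rfl
  | cons i l ih =>
    intro src
    show (solutionRemove ((PySem.List.remove? src i).getD src) l).length ≤ _
    refine le_trans (ih _) ?_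
    by_cases h : i ∈ src
    · rw [PySem.List.remove?_eq_some_erase src i h]
      exact (List.erase_sublist).length_le
    · rw [(PySem.List.remove?_eq_none_iff src i).mpr h]; exact le_rfl

lemma remove_dedup_lt (src : List Char) (h : src ≠ []) :
    (solutionRemove src (PySem.List.dedup src)).length < src.length := by
  obtain ⟨a, rest, rfl⟩ := List.exists_cons_of_ne_nil h
  have hd : PySem.List.dedup (a :: rest) = a :: PySem.Set.discard (PySem.Set.ofList rest) a := by
    simp [PySem.List.dedup_eq_ofList, PySem.Set.ofList_cons]
  rw [hd]
  have hstep : solutionRemove (a :: rest) (a :: PySem.Set.discard (PySem.Set.ofList rest) a)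
      = solutionRemove rest (PySem.Set.discard (PySem.Set.ofList rest) a) := by
    show solutionRemove ((PySem.List.remove? (a :: rest) a).getD (a :: rest)) _ = _
    rw [PySem.List.remove?_cons_self]; rfl
  rw [hstep]
  calc (solutionRemove rest _).length ≤ rest.length := solutionRemove_length_le _ _
    _ < (a :: rest).length := by simp

lemma solutionRemove_pass_lt (src : List Char) (h : src ≠ []) :
    (solutionRemove src (solutionPass src).2).length < src.length := by
  rw [solutionPass_eq_dedup]; exact remove_dedup_lt src h

-- the 'while source:' loop, with the accumulator 'answer'
def solutionLoop (src answer : List Char) : List Char :=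
  if h : src = [] then answer
  else
    let p := solutionPass src
    let src' := solutionRemove src p.2
    solutionLoop src' (answer ++ PySem.List.sorted p.1 (fun x => x))
termination_by src.length
decreasing_by exact solutionRemove_pass_lt src h

def solution (source : String) : String :=
  String.ofList (solutionLoop source.toList [])

-- ===== PORT B =====
-- counts[c] >= k is ported as getD: c is always a key of counts (c comes from counts' keys)
def solution_alt (source : String) : String :=
  let counts : PySem.Dict Char Int :=
    source.toList.foldl (fun d c => d.modify c 0 (· + 1)) PySem.Dict.empty
  let chars := PySem.List.sorted counts.keys (fun x => x)
  let m := PySem.List.maxD counts.values (fun x => x) 0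
  let out := (PySem.List.pyRange 1 (m + 1) 1).foldl
    (fun acc k =>
      chars.foldl (fun acc2 c => if k ≤ counts.getD c 0 then acc2 ++ [c] else acc2) acc)
    []
  String.ofList out

-- ===== PRECONDITION & SPEC =====
def Spec_solution (source : String) (out : String) : Prop := out = solution_alt source
instance (source : String) (out : String) : Decidable (Spec_solution source out) := by unfold Spec_solution; infer_instance

-- ===== CLAIM (what is proved, stated in full; the proofs are below) =====
def Claim_equal_solution : Prop := ∀ (source : String), Dom_solution source → Spec_solution source (solution source)

-- ===== LEMMAS AND PROOFS =====

-- common intermediate form: rounds k = 1..n, each round lists cs filtered to count ≥ k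
def roundsAux (n : Nat) (cs : List Char) (cnt : Char → Nat) : List Char :=
  (List.range n).flatMap (fun k => cs.filter (fun c => k + 1 ≤ cnt c))

-- the largest multiplicity in s
def maxCnt (s : List Char) : Nat :=
  ((PySem.List.dedup s).map (fun c => s.count c)).foldl max 0

-- the distinct characters of s in sorted order
def sortedDistinct (s : List Char) : List Char :=
  PySem.List.sorted (PySem.List.dedup s) (fun x => x)

lemma count_le_maxCnt (s : List Char) (c : Char) : s.count c ≤ maxCnt s := by
  by_cases h : c ∈ s
  · exact (PySem.List.le_foldl_max _ 0).2 _
      (List.mem_map.mpr ⟨c, (PySem.List.mem_dedup s c).mpr h, rfl⟩)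
  · simp [List.count_eq_zero_of_not_mem h]

lemma maxCnt_attained (s : List Char) (h : s ≠ []) :
    ∃ c ∈ s, s.count c = maxCnt s ∧ 1 ≤ maxCnt s := by
  obtain ⟨a, rest, rfl⟩ := List.exists_cons_of_ne_nil h
  have ha : 1 ≤ (a :: rest).count a := List.count_pos_iff.mpr (by simp)
  rcases PySem.List.foldl_max_mem ((PySem.List.dedup (a :: rest)).map (fun c => (a :: rest).count c)) 0 with h0 | hm
  · exfalso
    have := count_le_maxCnt (a :: rest) a
    unfold maxCnt at this
    omega
  · obtain ⟨c, hc, hcc⟩ := List.mem_map.mp hm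
    refine ⟨c, (PySem.List.mem_dedup _ c).mp hc, hcc, ?_⟩
    have h1 : 1 ≤ (a :: rest).count c := List.count_pos_iff.mpr ((PySem.List.mem_dedup _ c).mp hc)
    have := count_le_maxCnt (a :: rest) c
    omega

lemma solutionRemove_count (l : List Char) :
    ∀ (s : List Char), l.Nodup → (∀ x ∈ l, x ∈ s) → ∀ c,
      (solutionRemove s l).count c = if c ∈ l then s.count c - 1 else s.count c := by
  induction l with
  | nil => intro s _ _ c; simp [solutionRemove]
  | cons i l ih =>
    intro s hnd hsub c
    have hi : i ∈ s := hsub i (by simp)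
    have hstep : solutionRemove s (i :: l) = solutionRemove (s.erase i) l := by
      show (solutionRemove ((PySem.List.remove? s i).getD s) l) = _
      rw [PySem.List.remove?_eq_some_erase s i hi]; rfl
    rw [hstep, ih (s.erase i) hnd.of_cons
      (fun x hx => (List.mem_erase_of_ne (fun (he : x = i) => ((List.nodup_cons.mp hnd).1 (he ▸ hx)).elim)).mpr (hsub x (by simp [hx]))) c]
    by_cases hc : c = i
    · subst hc
      have := (List.nodup_cons.mp hnd).1
      simp [this, List.count_erase_self]
    · rw [List.count_erase_of_ne hc]
      simp [hc]

-- removing one copy of each distinct character shifts every multiplicity down by one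
lemma removed_count (s : List Char) (c : Char) :
    (solutionRemove s (PySem.List.dedup s)).count c = s.count c - 1 := by
  rw [solutionRemove_count (PySem.List.dedup s) s (PySem.List.nodup_dedup s)
    (fun x hx => (PySem.List.mem_dedup s x).mp hx) c]
  by_cases h : c ∈ PySem.List.dedup s
  · rw [if_pos h]
  · have hns : c ∉ s := fun hs => h ((PySem.List.mem_dedup s c).mpr hs)
    rw [if_neg h, List.count_eq_zero_of_not_mem hns]

lemma foldl_max_le {l : List Nat} {b : Nat} (h0 : 0 ≤ b) (h : ∀ x ∈ l, x ≤ b) :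
    l.foldl max 0 ≤ b := by
  rcases PySem.List.foldl_max_mem l 0 with he | hm
  · omega
  · exact h _ hm

lemma maxCnt_removed (s : List Char) (h : s ≠ []) :
    maxCnt (solutionRemove s (PySem.List.dedup s)) = maxCnt s - 1 := by
  set s' := solutionRemove s (PySem.List.dedup s) with hs'
  have hc : ∀ c, s'.count c = s.count c - 1 := fun c => removed_count s c
  have hle : maxCnt s' ≤ maxCnt s - 1 := by
    apply foldl_max_le (Nat.zero_le _)
    intro x hx
    obtain ⟨c, _, rfl⟩ := List.mem_map.mp hx
    have := count_le_maxCnt s c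
    rw [hc c]; omega
  obtain ⟨c, hcs, hcm, h1⟩ := maxCnt_attained s h
  by_cases h2 : maxCnt s = 1
  · omega
  · have hcnt' : s'.count c = maxCnt s - 1 := by rw [hc c, hcm]
    have hmem : c ∈ s' := List.count_pos_iff.mp (by omega)
    have := count_le_maxCnt s' c
    omega

lemma sortedDistinct_pairwise (s : List Char) : (sortedDistinct s).Pairwise (· < ·) := by
  unfold sortedDistinct
  rw [PySem.List.dedup_eq_ofList]
  exact PySem.List.sorted_ofList_pairwise_lt s

lemma sortedDistinct_nodup (s : List Char) : (sortedDistinct s).Nodup :=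
  (sortedDistinct_pairwise s).imp (fun h => ne_of_lt h)

lemma mem_sortedDistinct (s : List Char) (c : Char) : c ∈ sortedDistinct s ↔ c ∈ s := by
  unfold sortedDistinct
  rw [PySem.List.mem_sorted, PySem.List.mem_dedup]

lemma sortedDistinct_removed (s : List Char) :
    sortedDistinct (solutionRemove s (PySem.List.dedup s))
      = (sortedDistinct s).filter (fun c => 2 ≤ s.count c) := by
  have hl : sortedDistinct (solutionRemove s (PySem.List.dedup s))
      = PySem.List.sorted (PySem.List.dedup (solutionRemove s (PySem.List.dedup s))) (fun x => x) := rfl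
  rw [hl]
  apply PySem.List.sorted_eq_of_perm_of_pairwise_lt
  · rw [List.perm_ext_iff_of_nodup ((sortedDistinct_nodup s).filter _) (PySem.List.nodup_dedup _)]
    intro a
    rw [List.mem_filter, PySem.List.mem_dedup, mem_sortedDistinct]
    constructor
    · rintro ⟨_, h2⟩
      have h2' : 2 ≤ s.count a := by simpa using h2
      exact List.count_pos_iff.mp (by rw [removed_count]; omega)
    · intro h
      have := List.count_pos_iff.mpr h
      rw [removed_count] at this
      have h2 : 2 ≤ s.count a := by omega
      exact ⟨List.count_pos_iff.mp (by omega), by simpa using h2⟩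
  · exact List.Pairwise.filter _ (sortedDistinct_pairwise s)

lemma roundsAux_succ (n : Nat) (cs : List Char) (cnt : Char → Nat) :
    roundsAux (n + 1) cs cnt
      = cs.filter (fun c => 1 ≤ cnt c)
        ++ roundsAux n (cs.filter (fun c => 2 ≤ cnt c)) (fun c => cnt c - 1) := by
  unfold roundsAux
  rw [List.range_succ_eq_map]
  rw [List.flatMap_cons, List.flatMap_map]
  congr 1
  apply List.flatMap_congr
  intro k _
  rw [List.filter_filter]
  apply List.filter_congr
  intro c _
  simp only []
  rw [← Bool.decide_and, decide_eq_decide]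
  omega

lemma solutionLoop_eq (n : Nat) :
    ∀ (s ans : List Char), s.length ≤ n →
      solutionLoop s ans = ans ++ roundsAux (maxCnt s) (sortedDistinct s) (fun c => s.count c) := by
  induction n with
  | zero =>
    intro s ans hlen
    have hs : s = [] := List.eq_nil_of_length_eq_zero (Nat.le_zero.mp hlen)
    subst hs
    rw [solutionLoop]
    simp [roundsAux, maxCnt]
  | succ n ih =>
    intro s ans hlen
    by_cases hs : s = []
    · subst hs
      rw [solutionLoop]
      simp [roundsAux, maxCnt]
    · rw [solutionLoop]
      simp only [dif_neg hs, solutionPass_eq_dedup]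
      set s' := solutionRemove s (PySem.List.dedup s) with hs'
      have hlt : s'.length < s.length := remove_dedup_lt s hs
      rw [ih s' _ (by omega)]
      have hcnt : (fun c => s'.count c) = fun c => s.count c - 1 :=
        funext fun c => removed_count s c
      rw [hcnt, maxCnt_removed s hs, sortedDistinct_removed s]
      obtain ⟨c0, _, _, h1⟩ := maxCnt_attained s hs
      have hm : maxCnt s - 1 + 1 = maxCnt s := by omega
      rw [← hm, roundsAux_succ]
      have hfil : (sortedDistinct s).filter (fun c => 1 ≤ s.count c) = sortedDistinct s := by
        apply List.filter_eq_self.mpr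
        intro a ha
        have : a ∈ s := (mem_sortedDistinct s a).mp ha
        simpa using List.count_pos_iff.mpr this
      have hsorted : PySem.List.sorted (PySem.List.dedup s) (fun x => x) = sortedDistinct s := rfl
      rw [hsorted, List.append_assoc, hfil, Nat.add_sub_cancel]

lemma maxD_values (s : List Char) :
    PySem.List.maxD ((PySem.List.dedup s).map (fun c => (s.count c : Int))) (fun x => x) 0
      = (maxCnt s : Int) := by
  rcases eq_or_ne s [] with rfl | hne
  · simp [PySem.List.maxD, PySem.List.max?, maxCnt]
  · set lst := (PySem.List.dedup s).map (fun c => (s.count c : Int)) with hlst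
    have hlne : lst ≠ [] := by
      obtain ⟨a, rest, rfl⟩ := List.exists_cons_of_ne_nil hne
      simp [hlst, PySem.List.dedup_eq_ofList, PySem.Set.ofList_cons]
    obtain ⟨v, hv⟩ : ∃ v, PySem.List.max? lst (fun x => x) = some v := by
      cases h : PySem.List.max? lst (fun x => x) with
      | none => exact absurd ((PySem.List.max?_eq_none_iff _ _).mp h) hlne
      | some v => exact ⟨v, rfl⟩
    have hmem := PySem.List.max?_mem hv
    have hmax := PySem.List.max?_isMax hv
    obtain ⟨c, hc, rfl⟩ := List.mem_map.mp hmem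
    obtain ⟨c0, hc0s, hc0m, h1⟩ := maxCnt_attained s hne
    have hub : (s.count c : Int) ≤ (maxCnt s : Int) := by
      exact_mod_cast count_le_maxCnt s c
    have hlb : (maxCnt s : Int) ≤ (s.count c : Int) := by
      have : ((s.count c0 : Int)) ≤ (s.count c : Int) :=
        hmax _ (List.mem_map.mpr ⟨c0, (PySem.List.mem_dedup s c0).mpr hc0s, rfl⟩)
      omega
    have : (s.count c : Int) = (maxCnt s : Int) := le_antisymm hub hlb
    rw [PySem.List.maxD, hv, Option.getD_some, this]

lemma solution_alt_eq (source : String) :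
    solution_alt source
      = String.ofList (roundsAux (maxCnt source.toList) (sortedDistinct source.toList)
          (fun c => source.toList.count c)) := by
  set s := source.toList with hs
  have hkeys : (PySem.Dict.counter s).keys = PySem.List.dedup s := by
    rw [PySem.Dict.keys_counter, PySem.List.dedup_eq_ofList]
  have hvals : (PySem.Dict.counter s).values
      = (PySem.List.dedup s).map (fun c => (s.count c : Int)) := by
    show ((PySem.Dict.counter s).items).map (·.2) = _
    rw [PySem.Dict.items_counter, List.map_map, PySem.List.dedup_eq_ofList]
    rfl
  unfold solution_alt
  simp only [← hs, ← PySem.Dict.counter_eq_foldl, hkeys, hvals, maxD_values]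
  -- inner loop → filter
  have hinner : ∀ (k : Int) (acc : List Char),
      (PySem.List.sorted (PySem.List.dedup s) (fun x => x)).foldl
        (fun acc2 c => if k ≤ (PySem.Dict.counter s).getD c 0 then acc2 ++ [c] else acc2) acc
      = acc ++ (sortedDistinct s).filter (fun c => decide (k ≤ (s.count c : Int))) := by
    intro k acc
    rw [PySem.List.foldl_append_ite_eq_filter]
    congr 1
    apply List.filter_congr
    intro c _
    rw [PySem.Dict.getD_counter]
  simp only [hinner]
  rw [PySem.List.foldl_append_eq_flatMap]
  rw [List.nil_append]
  rw [PySem.List.pyRange_one]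
  rw [List.flatMap_map]
  unfold roundsAux
  have hn : ((maxCnt s : Int) + 1 - 1).toNat = maxCnt s := by omega
  rw [hn]
  congr 1
  apply List.flatMap_congr
  intro k _
  apply List.filter_congr
  intro c _
  simp only [decide_eq_decide]
  omega

-- ===== VERDICT (by name: the statement is the Claim_ definition above) =====
theorem solution_spec : Claim_equal_solution := by
  intro source _
  unfold Spec_solution solution
  rw [solutionLoop_eq source.toList.length source.toList [] le_rfl, solution_alt_eq]
  rfl
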